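-- pv_equiv track=rewrite | github.com/stathis-alexander/Hilb | EquivHilb/lib/CE_alg.py | _clefts
-- ===== SOURCE A (Python) =====
-- def _clefts(part):
--   c = []
--   if not part:
--     return [(0,0)]
--
--   k = part[0]+1
--   for i in range(len(part)):
--     if part[i] < k:
--       c.append((i,part[i]))
--       k = part[i]
--   c.append((len(part),0))
--   return c
-- ===== SOURCE B (Python) =====
-- def _clefts(part):
--     if not part:
--         return [(0, 0)]
--     # pass 1: running-minimum table
--     mins = []
--     m = part[0]
--     for x in part:
--         if x < m:
--             m = x
--         mins.append(m)
--     # pass 2: select positions where the running minimum strictly drops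
--     res = [(0, mins[0])]
--     res += [(i, cur) for i, (prev, cur) in enumerate(zip(mins, mins[1:]), start=1) if cur < prev]
--     res.append((len(part), 0))
--     return res
-- ===== Notes on version B (the rewrite author's own statement) =====
-- stated objective: alternative
-- what changed: Replaces A's single interleaved scan (mutable current-minimum k with in-loop appends) by a two-pass decomposition: first build the prefix-minimum table, then select by comparing adjacent table entries with a zip/enumerate comprehension.
import Mathlib
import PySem

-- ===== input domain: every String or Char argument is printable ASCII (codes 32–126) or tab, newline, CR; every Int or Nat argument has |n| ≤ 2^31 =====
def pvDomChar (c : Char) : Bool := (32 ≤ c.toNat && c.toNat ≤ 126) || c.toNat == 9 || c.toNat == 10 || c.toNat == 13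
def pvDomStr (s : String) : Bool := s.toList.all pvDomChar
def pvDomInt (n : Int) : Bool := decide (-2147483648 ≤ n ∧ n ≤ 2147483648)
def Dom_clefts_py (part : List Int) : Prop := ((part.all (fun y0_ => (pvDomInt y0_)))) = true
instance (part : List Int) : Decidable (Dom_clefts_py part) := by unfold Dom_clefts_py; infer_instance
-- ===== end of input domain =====

-- B replaces A's single interleaved running-minimum scan by a two-pass decomposition
-- (build prefix-minimum table, then select the strict-drop positions); objective: alternative.


-- ===== PORT A =====
-- literal port of A: one scan with current threshold k (= part[0]+1 initially), appending on each drop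
def clefts_py (part : List Int) : List (Int × Int) :=
  if part = [] then [(0, 0)]
  else
    let k0 : Int := PySem.List.pyGetD part 0 0 + 1
    let st := (PySem.List.enumerate part).foldl
      (fun (st : List (Int × Int) × Int) p =>
        if p.2 < st.2 then (st.1 ++ [(p.1, p.2)], p.2) else st)
      ([], k0)
    st.1 ++ [((part.length : Int), 0)]

-- ===== PORT B =====
-- port of B: pass 1 builds the prefix-minimum table, pass 2 selects adjacent strict drops
def clefts_py_alt (part : List Int) : List (Int × Int) :=
  if part = [] then [(0, 0)]
  else
    let mins := (part.foldl
      (fun (st : List Int × Int) x =>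
        if x < st.2 then (st.1 ++ [x], x) else (st.1 ++ [st.2], st.2))
      ([], PySem.List.pyGetD part 0 0)).1
    let res := [((0 : Int), PySem.List.pyGetD mins 0 0)]
    let res := res ++ (PySem.List.enumerate (mins.zip mins.tail) 1).filterMap
      (fun p => if p.2.2 < p.2.1 then some (p.1, p.2.2) else none)
    res ++ [((part.length : Int), 0)]

-- ===== PRECONDITION & SPEC =====
def Spec_clefts_py (part : List Int) (out : List (Int × Int)) : Prop := out = clefts_py_alt part
instance (part : List Int) (out : List (Int × Int)) : Decidable (Spec_clefts_py part out) := by unfold Spec_clefts_py; infer_instance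

-- ===== CLAIM (what is proved, stated in full; the proofs are below) =====
def Claim_equal_clefts_py : Prop := ∀ (part : List Int), Dom_clefts_py part → Spec_clefts_py part (clefts_py part)

-- ===== LEMMAS AND PROOFS =====

/-- reference form of the cleft scan: current minimum threshold `m`, next index `i`. -/
def pvCore (m i : Int) : List Int → List (Int × Int)
  | [] => []
  | y :: ys => if y < m then (i, y) :: pvCore y (i + 1) ys else pvCore m (i + 1) ys

/-- reference form of the prefix-minimum table continuing from minimum `m`. -/
def pvScanMin (m : Int) : List Int → List Int
  | [] => []
  | y :: ys => if y < m then y :: pvScanMin y ys else m :: pvScanMin m ys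

theorem pvA_loop (ys : List Int) : ∀ (acc : List (Int × Int)) (k s : Int),
    ((PySem.List.enumerate ys s).foldl
      (fun (st : List (Int × Int) × Int) p =>
        if p.2 < st.2 then (st.1 ++ [(p.1, p.2)], p.2) else st)
      (acc, k)).1 = acc ++ pvCore k s ys := by
  induction ys with
  | nil => intro acc k s; simp [PySem.List.enumerate_nil, pvCore]
  | cons y ys ih =>
    intro acc k s
    rw [PySem.List.enumerate_cons]
    simp only [List.foldl_cons, pvCore]
    by_cases h : y < k
    · simp [h, ih, List.append_assoc]
    · simp [h, ih]

theorem pvB_mins (ys : List Int) : ∀ (acc : List Int) (m : Int),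
    ((ys.foldl
      (fun (st : List Int × Int) x =>
        if x < st.2 then (st.1 ++ [x], x) else (st.1 ++ [st.2], st.2))
      (acc, m))).1 = acc ++ pvScanMin m ys := by
  induction ys with
  | nil => intro acc m; simp [pvScanMin]
  | cons y ys ih =>
    intro acc m
    simp only [List.foldl_cons, pvScanMin]
    by_cases h : y < m
    · simp [h, ih, List.append_assoc]
    · simp [h, ih]

theorem pvB_select (ys : List Int) : ∀ (m i : Int),
    (PySem.List.enumerate ((m :: pvScanMin m ys).zip (pvScanMin m ys)) i).filterMap
      (fun p => if p.2.2 < p.2.1 then some (p.1, p.2.2) else none) = pvCore m i ys := by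
  induction ys with
  | nil => intro m i; simp [pvScanMin, pvCore, PySem.List.enumerate_nil]
  | cons y ys ih =>
    intro m i
    by_cases h : y < m
    · have hzip : (m :: pvScanMin m (y :: ys)).zip (pvScanMin m (y :: ys))
          = (m, y) :: ((y :: pvScanMin y ys).zip (pvScanMin y ys)) := by
        simp [pvScanMin, h, List.zip]
      rw [hzip, PySem.List.enumerate_cons]
      simp only [List.filterMap_cons]
      simp [h, pvCore, ih]
    · have hzip : (m :: pvScanMin m (y :: ys)).zip (pvScanMin m (y :: ys))
          = (m, m) :: ((m :: pvScanMin m ys).zip (pvScanMin m ys)) := by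
        simp [pvScanMin, h, List.zip]
      rw [hzip, PySem.List.enumerate_cons]
      simp only [List.filterMap_cons]
      simp [pvCore, h, ih]

theorem pvScanMin_cons_self (x : Int) (xs : List Int) :
    pvScanMin x (x :: xs) = x :: pvScanMin x xs := by
  simp [pvScanMin]

-- ===== VERDICT (by name: the statement is the Claim_ definition above) =====
theorem clefts_py_spec : Claim_equal_clefts_py := by
  intro part _
  unfold Spec_clefts_py clefts_py clefts_py_alt
  cases part with
  | nil => simp
  | cons x xs =>
    simp only [if_neg (List.cons_ne_nil x xs)]
    rw [pvA_loop, pvB_mins]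
    simp only [PySem.List.pyGetD_zero_cons, List.nil_append, pvScanMin_cons_self, List.tail_cons]
    rw [pvB_select]
    have : pvCore (x + 1) 0 (x :: xs) = (0, x) :: pvCore x 1 xs := by
      simp [pvCore]
    rw [this]
    simp
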